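-- pv_equiv track=rewrite | github.com/mgllanos24/Auto_Trade | pattern_scanner.py | _normalise_watchlist_row
-- ===== SOURCE A (Python) =====
-- from typing import Any, Dict, List, Optional, Sequence, Union, get_args, get_origin
--
-- WATCHLIST_HEADER = [
--     'symbol',
--     'last_close',
--     'breakout_high',
--     'rr_ratio',
--     'stop_loss',
--     'target_price',
--     'direction',
--     'pattern',
--     '3mo_volume'
-- ]
--
-- def _normalise_watchlist_row(row: list[str], header: Optional[Sequence[str]] = None) -> list[str]:
--     """Pad or trim a CSV row so it matches ``WATCHLIST_HEADER``."""
--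
--     values = list(row)
--     header_list = list(header or [])
--
--     if header_list:
--         while "timestamp" in header_list:
--             idx = header_list.index("timestamp")
--             del header_list[idx]
--             if idx < len(values):
--                 del values[idx]
--     elif len(values) == len(WATCHLIST_HEADER) + 1:
--         # Legacy rows may still include a timestamp column even without a
--         # header.  The timestamp used to sit between ``target_price`` and
--         # ``direction``.
--         del values[6]
--
--     if len(values) < len(WATCHLIST_HEADER):
--         # Insert an empty placeholder for the ``last_close`` column right after
--         # the symbol.  This keeps backwards compatibility with watchlists
--         # written before that column existed.
--         values.insert(1, "")
--
--     if len(values) > len(WATCHLIST_HEADER):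
--         values = values[: len(WATCHLIST_HEADER)]
--
--     return values
-- ===== SOURCE B (Python) =====
-- from typing import Optional, Sequence
--
-- WATCHLIST_HEADER = [
--     'symbol',
--     'last_close',
--     'breakout_high',
--     'rr_ratio',
--     'stop_loss',
--     'target_price',
--     'direction',
--     'pattern',
--     '3mo_volume'
-- ]
--
-- def _normalise_watchlist_row(row: list[str], header: Optional[Sequence[str]] = None) -> list[str]:
--     """Pad or trim a CSV row so it matches ``WATCHLIST_HEADER``."""
--
--     values = list(row)
--     hdr = list(header or [])
--
--     if hdr:
--         # One pass: drop every value aligned with a 'timestamp' header cell,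
--         # keep the tail of values extending past the header untouched.
--         values = [v for h, v in zip(hdr, values) if h != "timestamp"] \
--                  + values[len(hdr):]
--     elif len(values) == len(WATCHLIST_HEADER) + 1:
--         # Legacy timestamp column between target_price and direction.
--         values = values[:6] + values[7:]
--
--     if len(values) < len(WATCHLIST_HEADER):
--         # Pad a last_close placeholder right after the symbol.
--         values = values[:1] + [""] + values[1:]
--
--     # Unconditional trim: a no-op when the row already fits.
--     return values[:len(WATCHLIST_HEADER)]
-- ===== Notes on version B (the rewrite author's own statement) =====
-- stated objective: simpler
-- what changed: Replaces A's while-loop of repeated 'timestamp' index-scans with paired in-place del by a single zip-filter pass plus the tail beyond the header, and replaces all in-place mutation (del values[6], values.insert(1,''), conditional trim) by pure slice concatenations with one unconditional final values[:9].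
import Mathlib
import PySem

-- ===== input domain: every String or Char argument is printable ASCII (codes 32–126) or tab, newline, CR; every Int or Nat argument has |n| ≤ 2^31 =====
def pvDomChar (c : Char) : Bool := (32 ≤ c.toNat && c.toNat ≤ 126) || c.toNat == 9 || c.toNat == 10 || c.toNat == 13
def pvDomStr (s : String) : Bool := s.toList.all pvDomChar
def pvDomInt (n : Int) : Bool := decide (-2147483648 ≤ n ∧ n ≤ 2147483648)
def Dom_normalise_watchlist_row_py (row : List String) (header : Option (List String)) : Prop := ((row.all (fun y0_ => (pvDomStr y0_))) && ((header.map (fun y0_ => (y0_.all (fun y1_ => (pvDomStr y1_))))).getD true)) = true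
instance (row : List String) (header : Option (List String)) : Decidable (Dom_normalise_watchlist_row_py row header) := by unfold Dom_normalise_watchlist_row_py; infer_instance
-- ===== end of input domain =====

-- ===== PORT A =====
-- A = B proved on all inputs; B strips timestamp columns in one zip-filter pass and
-- builds the result by pure slice concatenation with one unconditional final trim,
-- instead of A's repeated index+del loop and in-place del/insert/conditional-trim.
-- Return value only (neither program mutates its arguments observably).
def pvWatchlistHeader : List String :=
  ["symbol", "last_close", "breakout_high", "rr_ratio", "stop_loss",
   "target_price", "direction", "pattern", "3mo_volume"]

-- A's while-loop: repeatedly find the first "timestamp" in the header, delete it,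
-- and delete the value at the same index when it exists.
def pvStripA (header values : List String) : List String :=
  match h : PySem.List.index? header "timestamp" with
  | none => values
  | some i =>
      pvStripA (header.eraseIdx i)
        (if i < values.length then values.eraseIdx i else values)
termination_by header.length
decreasing_by
  obtain ⟨hk, -⟩ := PySem.List.getElem_of_index?_eq_some h
  simp [List.length_eraseIdx, hk]; omega

def normalise_watchlist_row_py (row : List String) (header : Option (List String)) : List String :=
  let values := row
  let header_list := header.getD []
  let values :=
    if header_list ≠ [] then
      pvStripA header_list values
    else if values.length = pvWatchlistHeader.length + 1 then
      values.eraseIdx 6                    -- del values[6]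
    else values
  let values :=
    if values.length < pvWatchlistHeader.length then
      PySem.List.insert values (1 : Int) ""    -- values.insert(1, "")
    else values
  if values.length > pvWatchlistHeader.length then
    PySem.List.slice values none (some (9 : Int))   -- values[:len(WATCHLIST_HEADER)]
  else values

-- ===== PORT B =====
-- B's single pass: keep each value whose zipped header cell is not "timestamp",
-- then append the tail of values beyond the header.
def pvStripB (header values : List String) : List String :=
  ((header.zip values).filter (fun p => p.1 != "timestamp")).map Prod.snd
    ++ values.drop header.length

-- pad via slice concatenation if short, then trim unconditionally; 9 = len(WATCHLIST_HEADER)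
def pvFit (values : List String) : List String :=
  (if values.length < 9 then values.take 1 ++ [""] ++ values.drop 1 else values).take 9

def normalise_watchlist_row_py_alt (row : List String) (header : Option (List String)) : List String :=
  pvFit (match header with
    | some (h :: hs) => pvStripB (h :: hs) row
    | _ => if row.length = 10 then row.take 6 ++ row.drop 7 else row)   -- values[:6] + values[7:]

-- ===== PRECONDITION & SPEC =====
def Spec_normalise_watchlist_row_py (row : List String) (header : Option (List String)) (out : List String) : Prop := out = normalise_watchlist_row_py_alt row header
instance (row : List String) (header : Option (List String)) (out : List String) : Decidable (Spec_normalise_watchlist_row_py row header out) := by unfold Spec_normalise_watchlist_row_py; infer_instance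

-- ===== CLAIM (what is proved, stated in full; the proofs are below) =====
def Claim_equal_normalise_watchlist_row_py : Prop := ∀ (row : List String) (header : Option (List String)), Dom_normalise_watchlist_row_py row header → Spec_normalise_watchlist_row_py row header (normalise_watchlist_row_py row header)

-- ===== LEMMAS AND PROOFS =====

-- the second components of a zip are a prefix of the right list
theorem pv_zip_map_snd (l l' : List String) :
    (l.zip l').map Prod.snd = l'.take l.length := by
  induction l generalizing l' with
  | nil => simp
  | cons x xs ih => cases l' with
    | nil => simp
    | cons y ys => simp [ih]

-- when the right list is no longer than the left part, zip ignores the appended tail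
theorem pv_zip_append_left (l1 l2 l' : List String) (h : l'.length ≤ l1.length) :
    (l1 ++ l2).zip l' = l1.zip l' := by
  induction l1 generalizing l' with
  | nil => cases l' with
    | nil => simp
    | cons y ys => simp at h
  | cons x xs ih => cases l' with
    | nil => simp
    | cons y ys =>
        simp only [List.cons_append, List.zip_cons_cons, List.cons.injEq, true_and]
        exact ih ys (by simpa using h)

-- B's pass is the identity when the header has no "timestamp"
theorem pvStripB_of_not_mem (header values : List String)
    (h : "timestamp" ∉ header) : pvStripB header values = values := by
  unfold pvStripB
  have hf : (header.zip values).filter (fun p => p.1 != "timestamp")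
      = header.zip values := by
    apply List.filter_eq_self.2
    intro p hp
    have : p.1 ∈ header := (List.of_mem_zip hp).1
    simp only [bne_iff_ne, ne_eq]
    intro he; exact h (he ▸ this)
  rw [hf, pv_zip_map_snd, List.take_append_drop]

theorem pv_eraseIdx_append_cons (pre suf : List String) (x : String) :
    (pre ++ x :: suf).eraseIdx pre.length = pre ++ suf := by
  induction pre with
  | nil => simp
  | cons a as ih => simpa [List.eraseIdx] using ih

-- core lemma: A's loop equals B's single pass
theorem pvStrip_eq (header values : List String) :
    pvStripA header values = pvStripB header values := by
  have main : ∀ n (header values : List String), header.length = n →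
      pvStripA header values = pvStripB header values := by
    intro n
    induction n using Nat.strong_induction_on with
    | _ n ih =>
      intro header values hlen
      rw [pvStripA.eq_def]
      split
      · next h =>
        rw [pvStripB_of_not_mem header values
          ((PySem.List.index?_eq_none_iff header "timestamp").mp (by simpa using h))]
      · next i h =>
        obtain ⟨hk, -⟩ := PySem.List.getElem_of_index?_eq_some h
        rw [ih (header.eraseIdx i).length
            (by simp [List.length_eraseIdx, hk]; omega) _ _ rfl]
        obtain ⟨pre, suf, hh, hlenp, hnot⟩ := (PySem.List.index?_eq_some_iff header "timestamp" i).mp (by simpa using h)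
        subst hh; subst hlenp
        by_cases hi : pre.length < values.length
        · -- the value at the same index is deleted in lockstep
          simp only [if_pos hi]
          obtain ⟨v, vsuf, hv⟩ : ∃ v vsuf, values.drop pre.length = v :: vsuf := by
            cases hd : values.drop pre.length with
            | nil => exact absurd (List.drop_eq_nil_iff.mp hd) (by omega)
            | cons v vsuf => exact ⟨v, vsuf, rfl⟩
          obtain ⟨vpre, hvals, hvlen⟩ :
              ∃ vpre, values = vpre ++ v :: vsuf ∧ vpre.length = pre.length :=
            ⟨values.take pre.length,
             by conv_lhs => rw [← List.take_append_drop pre.length values, hv],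
             List.length_take_of_le (by omega)⟩
          rw [hvals, ← hvlen, pv_eraseIdx_append_cons, hvlen, pv_eraseIdx_append_cons]
          unfold pvStripB
          rw [List.zip_append (by rw [hvlen]), List.zip_append (by rw [hvlen])]
          simp only [List.zip_cons_cons, List.filter_append, List.filter_cons,
            bne_self_eq_false, List.map_append, List.length_append, List.length_cons]
          rw [List.drop_append, List.drop_append]
          have h1 : List.drop (pre.length + suf.length) vpre = [] :=
            List.drop_eq_nil_of_le (by omega)
          have h2 : List.drop (pre.length + (suf.length + 1)) vpre = [] :=
            List.drop_eq_nil_of_le (by omega)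
          have h3 : pre.length + suf.length - vpre.length = suf.length := by omega
          have h4 : pre.length + (suf.length + 1) - vpre.length = suf.length + 1 := by omega
          rw [h1, h2, h3, h4, List.drop_succ_cons]
          simp
        · -- the timestamp sits past the end of values: only the header shrinks
          simp only [if_neg hi]
          have hle : values.length ≤ pre.length := by omega
          rw [pv_eraseIdx_append_cons]
          unfold pvStripB
          rw [pv_zip_append_left pre suf values hle,
              pv_zip_append_left pre ("timestamp" :: suf) values hle]
          rw [List.drop_eq_nil_of_le (by simp; omega),
              List.drop_eq_nil_of_le (by simp; omega)]
  exact main header.length header values rfl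

-- A's pad-then-conditionally-trim equals B's slice-pad-then-always-trim
theorem pvTail_eq (v : List String) :
    (if (if v.length < 9 then PySem.List.insert v (1 : Int) "" else v).length > 9 then
       PySem.List.slice (if v.length < 9 then PySem.List.insert v (1 : Int) "" else v)
         none (some (9 : Int))
     else (if v.length < 9 then PySem.List.insert v (1 : Int) "" else v)) = pvFit v := by
  unfold pvFit
  by_cases hs : v.length < 9
  · cases v with
    | nil => simp [PySem.List.insert]
    | cons x xs =>
        have hx : xs.length + 1 < 9 := by simpa using hs
        rw [if_pos hs, if_pos hs,
          PySem.List.insert_ofNat (x :: xs) 1 "" (by simp)]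
        rw [if_neg (by simp; omega), List.append_assoc]
        simp only [List.singleton_append]
        rw [eq_comm, List.take_of_length_le (by simp; omega)]
  · rw [if_neg hs, if_neg hs]
    by_cases ht : v.length > 9
    · rw [if_pos ht]
      have := PySem.List.slice_to (xs := v) (b := (9 : Int)) (by norm_num)
      simpa using this
    · rw [if_neg ht, eq_comm, List.take_of_length_le (by omega)]

-- legacy del values[6] on a length-10 row equals the slice concatenation
theorem pv_eraseIdx6 (v : List String) :
    v.eraseIdx 6 = v.take 6 ++ v.drop 7 := by
  rw [List.eraseIdx_eq_take_drop_succ]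

-- ===== VERDICT (by name: the statement is the Claim_ definition above) =====
theorem normalise_watchlist_row_py_spec : Claim_equal_normalise_watchlist_row_py := by
  intro row header _
  show _ = _
  unfold normalise_watchlist_row_py normalise_watchlist_row_py_alt
  match header with
  | none =>
      simp only [Option.getD, ne_eq, not_true_eq_false, if_false, pvWatchlistHeader]
      rw [← pvTail_eq]
      simp only [List.length_cons, List.length_nil, pv_eraseIdx6]
  | some [] =>
      simp only [Option.getD, ne_eq, not_true_eq_false, if_false, pvWatchlistHeader]
      rw [← pvTail_eq]
      simp only [pv_eraseIdx6]
      rfl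
  | some (h :: hs) =>
      simp only [Option.getD, ne_eq, reduceCtorEq, not_false_eq_true, if_true,
        pvStrip_eq, pvWatchlistHeader]
      rw [← pvTail_eq]
      rfl
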